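-- pv_equiv track=rewrite | github.com/jFlamer/OOPsy-oop_learning_language | kolorowy_skaner.py | color_lines
-- ===== SOURCE A (Python) =====
-- KEYWORDS = ["if", "else", "elif", "for", "while", "import", "function", "return"]
--
-- BOOLEANS = ["true", "false"]
--
-- OPERATORS = ["=", "!", "+", "-", "*", "/", "<", ">"]
--
-- BRACKETS = ["(", ")", "[", "]", "{", "}"]
--
-- TYPES = ["int", "string", "decimal", "true", "false"]
--
-- def is_letter(c):
--     return c.isalpha() or c == "_"
--
-- def is_digit(c):
--     return c.isdigit()
--
-- def is_letter_or_digit(c):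
--     return is_letter(c) or is_digit(c)
--
-- def color_lines(line):
--     result=""
--     l = len(line)
--     i = 0
--     while i < l:
--         c = line[i]
--         if c.isspace():
--             result += c
--             i += 1
--             continue
--         #number
--         if is_digit(c):
--             start_of_number = i
--             while i < l and is_digit(line[i]):
--                 i += 1
--             result += f'<span class="token-number">{line[start_of_number:i]}</span>'
--             continue
--         #string
--         if c == '"':
--             start_of_string = i
--             i += 1
--             while i < l and line[i] != '"':
--                 i += 1
--             i += 1
--             result += f'<span class="token-string">{line[start_of_string:i]}</span>'
--             continue
--         #identifiers, keywords, etc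
--         if is_letter(c):
--             start_of_identifier = i
--             while i < l and is_letter_or_digit(line[i]):
--                 i += 1
--             text = line[start_of_identifier:i]
--             if text in KEYWORDS:
--                 result += f'<span class="token-keyword">{text}</span>'
--             elif text in BOOLEANS:
--                 result += f'<span class="token-boolean">{text}</span>'
--             elif text in TYPES:
--                 result += f'<span class="token-type">{text}</span>'
--             else:
--                 result += f'<span class="token-identifier">{text}</span>'
--             continue
--
--
--         if c in OPERATORS:
--             i += 1
--             result += f'<span class="token-operator">{c}</span>'
--             continue
--
--         if c in BRACKETS:
--             i += 1
--             result += f'<span class="token-bracket">{c}</span>'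
--             continue
--
--         if c == "#":
--             result += f'<span class="token-comment">{line[i:]}</span>'
--             break
--
--         if c == "[":
--             start_of_array = i
--             i += 1
--             while i < l and (is_letter_or_digit(line[i]) or line[i] == " " or line[i] == ","):
--                 i += 1
--             if i < l and line[i] == "]":
--                 result += f'<span class="token-array">{line[start_of_array:i+1]}</span>'
--                 continue
--
--         if c == "=" and i > 0 and line[i - 1] == "]":
--             result += f'<span class="token-operator">=</span>'
--             i += 1
--             continue
--
--         result += c
--         i += 1
--     return result
-- ===== SOURCE B (Python) =====
-- # B: iterator-based lexer with one-character lookahead -- consumes the line through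
-- # a single iterator and a generic _take helper, classifying words via one dict,
-- # instead of A's index/while-loop scanner with a membership elif chain.
--
-- _CLASS = {}
-- for _t in ("int", "string", "decimal", "true", "false"):
--     _CLASS[_t] = "type"
-- for _b in ("true", "false"):
--     _CLASS[_b] = "boolean"
-- for _k in ("if", "else", "elif", "for", "while", "import", "function", "return"):
--     _CLASS[_k] = "keyword"
--
--
-- def _take(pred, it):
--     """Collect chars from it while pred holds; return (collected, first char failing pred or None)."""
--     buf = []
--     for ch in it:
--         if not pred(ch):
--             return "".join(buf), ch
--         buf.append(ch)
--     return "".join(buf), None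
--
--
-- def _word_char(ch):
--     return ch.isalpha() or ch == "_" or ch.isdigit()
--
--
-- def color_lines(line):
--     parts = []
--     it = iter(line)
--     c = next(it, None)
--     while c is not None:
--         if c.isspace():
--             parts.append(c)
--             c = next(it, None)
--         elif c.isdigit():
--             tok, nxt = _take(str.isdigit, it)
--             parts.append(f'<span class="token-number">{c}{tok}</span>')
--             c = nxt
--         elif c == '"':
--             body, q = _take(lambda ch: ch != '"', it)
--             if q is None:
--                 parts.append(f'<span class="token-string">"{body}</span>')
--             else:
--                 parts.append(f'<span class="token-string">"{body}"</span>')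
--             c = next(it, None)
--         elif c.isalpha() or c == "_":
--             tok, nxt = _take(_word_char, it)
--             word = c + tok
--             cls = _CLASS.get(word, "identifier")
--             parts.append(f'<span class="token-{cls}">{word}</span>')
--             c = nxt
--         elif c in "=!+-*/<>":
--             parts.append(f'<span class="token-operator">{c}</span>')
--             c = next(it, None)
--         elif c in "()[]{}":
--             parts.append(f'<span class="token-bracket">{c}</span>')
--             c = next(it, None)
--         elif c == "#":
--             parts.append(f'<span class="token-comment">{c}{"".join(it)}</span>')
--             c = next(it, None)
--         else:
--             parts.append(c)
--             c = next(it, None)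
--     return "".join(parts)
-- ===== Notes on version B (the rewrite author's own statement) =====
-- stated objective: alternative
-- what changed: A scans with an integer index, hand-written inner while-loops and a keyword/boolean/type membership elif chain; B consumes the line through a single iterator with one-character lookahead, a generic take-while helper, and one classification dict built once at module level.
import Mathlib
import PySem

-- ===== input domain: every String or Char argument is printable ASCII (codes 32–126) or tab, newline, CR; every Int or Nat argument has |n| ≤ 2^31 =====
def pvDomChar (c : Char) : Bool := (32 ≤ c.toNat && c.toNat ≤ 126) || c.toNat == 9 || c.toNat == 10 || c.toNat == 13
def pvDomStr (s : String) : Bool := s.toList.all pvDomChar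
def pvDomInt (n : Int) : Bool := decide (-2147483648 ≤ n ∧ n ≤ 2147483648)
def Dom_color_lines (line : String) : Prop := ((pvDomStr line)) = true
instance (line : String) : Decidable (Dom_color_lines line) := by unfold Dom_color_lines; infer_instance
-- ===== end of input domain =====

-- B replaces A's index/while-loop scanner by an iterator-with-lookahead lexer with a
-- generic take-while helper and a single classification dict (objective: alternative;
-- same cost). Both ports work on the char-list side (PySem convention).

-- ===== PORT A =====
def pvIsLetter (c : Char) : Bool := PySem.Chars.isalpha c || c == '_'
def pvIsDigit (c : Char) : Bool := PySem.Chars.isdigit c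
def pvIsLetterOrDigit (c : Char) : Bool := pvIsLetter c || pvIsDigit c

def pvKEYWORDS : List (List Char) :=
  ["if".toList, "else".toList, "elif".toList, "for".toList, "while".toList,
   "import".toList, "function".toList, "return".toList]
def pvBOOLEANS : List (List Char) := ["true".toList, "false".toList]
def pvOPERATORS : List Char := ['=', '!', '+', '-', '*', '/', '<', '>']
def pvBRACKETS : List Char := ['(', ')', '[', ']', '{', '}']
def pvTYPES : List (List Char) :=
  ["int".toList, "string".toList, "decimal".toList, "true".toList, "false".toList]

-- A's inner scans 'while i < l and pred(line[i]): i += 1' (one helper, four predicates)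
def pvSkip (p : Char → Bool) (cs : List Char) (i : Nat) : Nat :=
  if h : i < cs.length ∧ p (cs.getD i ' ') = true then pvSkip p cs (i + 1) else i
termination_by cs.length - i
decreasing_by omega

-- characterization of pvSkip, cited by pvLoopA's decreasing_by
theorem pvSkip_eq (p : Char → Bool) (cs : List Char) : ∀ i, pvSkip p cs i = i + ((cs.drop i).takeWhile p).length := by
  intro i
  rw [pvSkip]
  split
  · rename_i h
    have h1 := h.1
    have hd : cs.drop i = cs.getD i ' ' :: cs.drop (i + 1) := by
      rw [List.getD_eq_getElem cs ' ' h1, List.getElem_cons_drop]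
    have := pvSkip_eq p cs (i + 1)
    rw [this, hd, List.takeWhile_cons_of_pos h.2]
    simp; omega
  · rename_i h
    by_cases h1 : i < cs.length
    · have hd : cs.drop i = cs.getD i ' ' :: cs.drop (i + 1) := by
        rw [List.getD_eq_getElem cs ' ' h1, List.getElem_cons_drop]
      have h2 : p (cs.getD i ' ') = false := by
        cases hpv : p (cs.getD i ' ')
        · rfl
        · exact absurd ⟨h1, hpv⟩ h
      rw [hd, List.takeWhile_cons_of_neg (by simpa [List.getD] using h2)]
      simp
    · rw [List.drop_eq_nil_of_le (by omega)]
      simp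
termination_by i => cs.length - i
decreasing_by omega

theorem pvSkip_le (p : Char → Bool) (cs : List Char) (i : Nat) : i ≤ pvSkip p cs i := by
  rw [pvSkip_eq]; omega

theorem pvSkip_lt (p : Char → Bool) (cs : List Char) (i : Nat)
    (h1 : i < cs.length) (h2 : p (cs.getD i ' ') = true) : i < pvSkip p cs i := by
  rw [pvSkip]
  rw [dif_pos ⟨h1, h2⟩]
  calc i < i + 1 := Nat.lt_succ_self i
    _ ≤ pvSkip p cs (i + 1) := pvSkip_le p cs (i + 1)

-- the main while-loop of A ('result' is the accumulated string, as a char list)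
def pvLoopA (cs : List Char) (i : Nat) (result : List Char) : List Char :=
  if h : i < cs.length then
    let c := cs.getD i ' '
    if hsp : PySem.Chars.isspace c = true then
      pvLoopA cs (i + 1) (result ++ [c])
    else if hdg : pvIsDigit c = true then
      let j := pvSkip pvIsDigit cs i
      pvLoopA cs j (result ++ "<span class=\"token-number\">".toList
        ++ PySem.List.slice cs (some (i : Int)) (some (j : Int)) ++ "</span>".toList)
    else if hq : c = '"' then
      let j := pvSkip (fun ch => ch != '"') cs (i + 1) + 1
      pvLoopA cs j (result ++ "<span class=\"token-string\">".toList
        ++ PySem.List.slice cs (some (i : Int)) (some (j : Int)) ++ "</span>".toList)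
    else if hlt : pvIsLetter c = true then
      let j := pvSkip pvIsLetterOrDigit cs i
      let text := PySem.List.slice cs (some (i : Int)) (some (j : Int))
      if text ∈ pvKEYWORDS then
        pvLoopA cs j (result ++ "<span class=\"token-keyword\">".toList ++ text ++ "</span>".toList)
      else if text ∈ pvBOOLEANS then
        pvLoopA cs j (result ++ "<span class=\"token-boolean\">".toList ++ text ++ "</span>".toList)
      else if text ∈ pvTYPES then
        pvLoopA cs j (result ++ "<span class=\"token-type\">".toList ++ text ++ "</span>".toList)
      else
        pvLoopA cs j (result ++ "<span class=\"token-identifier\">".toList ++ text ++ "</span>".toList)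
    else if c ∈ pvOPERATORS then
      pvLoopA cs (i + 1) (result ++ "<span class=\"token-operator\">".toList ++ [c] ++ "</span>".toList)
    else if c ∈ pvBRACKETS then
      pvLoopA cs (i + 1) (result ++ "<span class=\"token-bracket\">".toList ++ [c] ++ "</span>".toList)
    else if c = '#' then
      result ++ "<span class=\"token-comment\">".toList
        ++ PySem.List.slice cs (some (i : Int)) none ++ "</span>".toList
    else if c = '[' then
      -- dead in practice ('[' is caught by the bracket branch above); transliterated for fidelity,
      -- including the fall-through to the '=' check and the default append when no ']' closes
      let j := pvSkip (fun ch => pvIsLetterOrDigit ch || ch == ' ' || ch == ',') cs (i + 1)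
      if j < cs.length ∧ cs.getD j ' ' = ']' then
        pvLoopA cs (j + 1) (result ++ "<span class=\"token-array\">".toList
          ++ PySem.List.slice cs (some (i : Int)) (some ((j : Int) + 1)) ++ "</span>".toList)
      else if c = '=' ∧ 0 < j ∧ cs.getD (j - 1) ' ' = ']' then
        pvLoopA cs (j + 1) (result ++ "<span class=\"token-operator\">=</span>".toList)
      else
        pvLoopA cs (j + 1) (result ++ [c])
    else if c = '=' ∧ 0 < i ∧ cs.getD (i - 1) ' ' = ']' then
      pvLoopA cs (i + 1) (result ++ "<span class=\"token-operator\">=</span>".toList)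
    else
      pvLoopA cs (i + 1) (result ++ [c])
  else result
termination_by cs.length - i
decreasing_by
  · omega
  · have := pvSkip_lt pvIsDigit cs i h hdg; omega
  · have := pvSkip_le (fun ch => ch != '"') cs (i + 1); omega
  · have := pvSkip_lt pvIsLetterOrDigit cs i h (by simp only [pvIsLetterOrDigit, Bool.or_eq_true]; exact Or.inl (by simpa [List.getD] using hlt))
    omega
  · have := pvSkip_lt pvIsLetterOrDigit cs i h (by simp only [pvIsLetterOrDigit, Bool.or_eq_true]; exact Or.inl (by simpa [List.getD] using hlt))
    omega
  · have := pvSkip_lt pvIsLetterOrDigit cs i h (by simp only [pvIsLetterOrDigit, Bool.or_eq_true]; exact Or.inl (by simpa [List.getD] using hlt))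
    omega
  · have := pvSkip_lt pvIsLetterOrDigit cs i h (by simp only [pvIsLetterOrDigit, Bool.or_eq_true]; exact Or.inl (by simpa [List.getD] using hlt))
    omega
  · omega
  · omega
  · have := pvSkip_le (fun ch => pvIsLetterOrDigit ch || ch == ' ' || ch == ',') cs (i + 1); omega
  · have := pvSkip_le (fun ch => pvIsLetterOrDigit ch || ch == ' ' || ch == ',') cs (i + 1); omega
  · have := pvSkip_le (fun ch => pvIsLetterOrDigit ch || ch == ' ' || ch == ',') cs (i + 1); omega
  · omega
  · omega

def color_lines (line : String) : String := String.mk (pvLoopA line.toList 0 [])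

-- ===== PORT B =====
-- the module-level _CLASS dict of Source B
def pvClassB : PySem.Dict (List Char) (List Char) :=
  let d := (["int", "string", "decimal", "true", "false"].map String.toList).foldl
    (fun d t => d.insert t "type".toList) (PySem.Dict.mk [])
  let d := (["true", "false"].map String.toList).foldl
    (fun d b => d.insert b "boolean".toList) d
  (["if", "else", "elif", "for", "while", "import", "function", "return"].map String.toList).foldl
    (fun d k => d.insert k "keyword".toList) d

def pvWordChar (ch : Char) : Bool := PySem.Chars.isalpha ch || ch == '_' || PySem.Chars.isdigit ch

-- Source B's _take: the iterator is a char list; returns (collected, failing char or none,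
-- what is left of the iterator after the failing char was consumed)
def pvTake (p : Char → Bool) : List Char → List Char × Option Char × List Char
  | [] => ([], none, [])
  | ch :: t =>
    if p ch then
      let r := pvTake p t
      (ch :: r.1, r.2.1, r.2.2)
    else ([], some ch, t)

-- cited by pvLoopB's decreasing_by
theorem pvTake_size (p : Char → Bool) : ∀ it : List Char,
    (pvTake p it).2.2.length + (if (pvTake p it).2.1.isSome then 1 else 0) ≤ it.length := by
  intro it
  induction it with
  | nil => simp [pvTake]
  | cons ch t ih =>
    by_cases hp : p ch = true
    · simp only [pvTake, if_pos hp]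
      simpa using Nat.le_succ_of_le ih
    · simp [pvTake, hp]

-- Source B's main while loop: c is the lookahead char (None = exhausted), it the iterator
def pvLoopB (c? : Option Char) (it : List Char) (parts : List (List Char)) : List (List Char) :=
  match c? with
  | none => parts
  | some c =>
    if PySem.Chars.isspace c then
      pvLoopB it.head? it.tail (parts ++ [[c]])
    else if PySem.Chars.isdigit c then
      let r := pvTake PySem.Chars.isdigit it
      pvLoopB r.2.1 r.2.2
        (parts ++ ["<span class=\"token-number\">".toList ++ c :: r.1 ++ "</span>".toList])
    else if c = '"' then
      let r := pvTake (fun ch => ch != '"') it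
      match r.2.1 with
      | none =>
        pvLoopB r.2.2.head? r.2.2.tail
          (parts ++ ["<span class=\"token-string\">".toList ++ '"' :: r.1 ++ "</span>".toList])
      | some _ =>
        pvLoopB r.2.2.head? r.2.2.tail
          (parts ++ ["<span class=\"token-string\">".toList ++ '"' :: r.1 ++ '"' :: "</span>".toList])
    else if PySem.Chars.isalpha c || c == '_' then
      let r := pvTake pvWordChar it
      let word := c :: r.1
      let cls := pvClassB.getD word "identifier".toList
      pvLoopB r.2.1 r.2.2
        (parts ++ ["<span class=\"token-".toList ++ cls ++ "\">".toList ++ word ++ "</span>".toList])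
    else if c ∈ "=!+-*/<>".toList then
      pvLoopB it.head? it.tail
        (parts ++ ["<span class=\"token-operator\">".toList ++ c :: "</span>".toList])
    else if c ∈ "()[]{}".toList then
      pvLoopB it.head? it.tail
        (parts ++ ["<span class=\"token-bracket\">".toList ++ c :: "</span>".toList])
    else if c = '#' then
      pvLoopB none [] (parts ++ ["<span class=\"token-comment\">".toList ++ c :: it ++ "</span>".toList])
    else
      pvLoopB it.head? it.tail (parts ++ [[c]])
termination_by it.length + (if c?.isSome then 1 else 0)
decreasing_by
  all_goals simp only [Option.isSome_some, if_pos rfl]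
  all_goals try ((cases it <;> simp) <;> done)
  all_goals try (simp; done)
  all_goals
    (have h1 := pvTake_size PySem.Chars.isdigit it
     have h2 := pvTake_size pvWordChar it
     have h3 := pvTake_size (fun ch => ch != '"') it
     have h4 : (pvTake (fun ch => ch != '"') it).2.2.length ≤ it.length :=
       le_trans (Nat.le_add_right _ _) h3
     rcases hq : (pvTake (fun ch => ch != '"') it).2.2 with _ | ⟨d, t⟩ <;>
       (try split_ifs at *) <;> (try simp_all) <;> omega)

def color_lines_alt (line : String) : String :=
  String.mk ((pvLoopB line.toList.head? line.toList.tail []).flatten)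

-- ===== PRECONDITION & SPEC =====
def Spec_color_lines (line : String) (out : String) : Prop := out = color_lines_alt line
instance (line : String) (out : String) : Decidable (Spec_color_lines line out) := by unfold Spec_color_lines; infer_instance

-- ===== CLAIM (what is proved, stated in full; the proofs are below) =====
def Claim_equal_color_lines : Prop := ∀ (line : String), Dom_color_lines line → Spec_color_lines line (color_lines line)

-- ===== LEMMAS AND PROOFS =====

theorem pvTake_eq (p : Char → Bool) (it : List Char) :
    pvTake p it = (it.takeWhile p, (it.dropWhile p).head?, (it.dropWhile p).tail) := by
  induction it with
  | nil => simp [pvTake]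
  | cons ch t ih =>
    by_cases hp : p ch = true <;>
      simp [pvTake, hp, ih, List.takeWhile_cons, List.dropWhile_cons]

theorem pvTailBound (it : List Char) :
    it.tail.length + (if it.head?.isSome then 1 else 0) ≤ it.length := by
  cases it <;> simp

theorem pvTakeRestBound (p : Char → Bool) (it : List Char) :
    (pvTake p it).2.2.tail.length + (if (pvTake p it).2.2.head?.isSome then 1 else 0) ≤ it.length :=
  le_trans (pvTailBound _) (le_trans (Nat.le_add_right _ _) (pvTake_size p it))

theorem pvLoopB_acc : ∀ (n : Nat) (c? : Option Char) (it : List Char) (parts : List (List Char)),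
    it.length + (if c?.isSome then 1 else 0) ≤ n →
    pvLoopB c? it parts = parts ++ pvLoopB c? it [] := by
  intro n
  induction n with
  | zero =>
    intro c? it parts h
    cases c? with
    | none => simp [pvLoopB]
    | some c => simp at h
  | succ n ih =>
    intro c? it parts h
    cases c? with
    | none => simp [pvLoopB]
    | some c =>
      have hit : it.length ≤ n := by simp at h; omega
      have e1 := fun ps => ih it.head? it.tail ps (le_trans (pvTailBound it) hit)
      have e2 := fun ps => ih (pvTake PySem.Chars.isdigit it).2.1 (pvTake PySem.Chars.isdigit it).2.2 ps
        (le_trans (pvTake_size _ it) hit)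
      have e3 := fun ps => ih (pvTake (fun ch => ch != '"') it).2.2.head?
        (pvTake (fun ch => ch != '"') it).2.2.tail ps (le_trans (pvTakeRestBound _ it) hit)
      have e4 := fun ps => ih (pvTake pvWordChar it).2.1 (pvTake pvWordChar it).2.2 ps
        (le_trans (pvTake_size _ it) hit)
      have e5 := fun ps => ih none [] ps (by simp)
      simp only [pvLoopB]
      split_ifs <;> (try split)
      · rw [e1 (parts ++ _), e1 ([] ++ _)]; simp
      · rw [e2 (parts ++ _), e2 ([] ++ _)]; simp
      · rw [e3 (parts ++ _), e3 ([] ++ _)]; simp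
      · rw [e3 (parts ++ _), e3 ([] ++ _)]; simp
      · rw [e4 (parts ++ _), e4 ([] ++ _)]; simp
      · rw [e1 (parts ++ _), e1 ([] ++ _)]; simp
      · rw [e1 (parts ++ _), e1 ([] ++ _)]; simp
      · simp
      · rw [e1 (parts ++ _), e1 ([] ++ _)]; simp

theorem pvClassify (w : List Char) :
    pvClassB.getD w "identifier".toList =
      (if w ∈ pvKEYWORDS then "keyword".toList
       else if w ∈ pvBOOLEANS then "boolean".toList
       else if w ∈ pvTYPES then "type".toList
       else "identifier".toList) := by
  by_cases h1 : w = ['i', 'f']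
  · subst h1; decide
  by_cases h2 : w = ['e', 'l', 's', 'e']
  · subst h2; decide
  by_cases h3 : w = ['e', 'l', 'i', 'f']
  · subst h3; decide
  by_cases h4 : w = ['f', 'o', 'r']
  · subst h4; decide
  by_cases h5 : w = ['w', 'h', 'i', 'l', 'e']
  · subst h5; decide
  by_cases h6 : w = ['i', 'm', 'p', 'o', 'r', 't']
  · subst h6; decide
  by_cases h7 : w = ['f', 'u', 'n', 'c', 't', 'i', 'o', 'n']
  · subst h7; decide
  by_cases h8 : w = ['r', 'e', 't', 'u', 'r', 'n']
  · subst h8; decide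
  by_cases h9 : w = ['t', 'r', 'u', 'e']
  · subst h9; decide
  by_cases h10 : w = ['f', 'a', 'l', 's', 'e']
  · subst h10; decide
  by_cases h11 : w = ['i', 'n', 't']
  · subst h11; decide
  by_cases h12 : w = ['s', 't', 'r', 'i', 'n', 'g']
  · subst h12; decide
  by_cases h13 : w = ['d', 'e', 'c', 'i', 'm', 'a', 'l']
  · subst h13; decide
  have hm1 : w ∉ pvKEYWORDS := by simp [pvKEYWORDS, h1, h2, h3, h4, h5, h6, h7, h8]
  have hm2 : w ∉ pvBOOLEANS := by simp [pvBOOLEANS, h9, h10]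
  have hm3 : w ∉ pvTYPES := by simp [pvTYPES, h11, h12, h13, h9, h10]
  rw [if_neg hm1, if_neg hm2, if_neg hm3]
  have g1 : (['i', 'f'] == w) = false := beq_eq_false_iff_ne.mpr (Ne.symm h1)
  have g2 : (['e', 'l', 's', 'e'] == w) = false := beq_eq_false_iff_ne.mpr (Ne.symm h2)
  have g3 : (['e', 'l', 'i', 'f'] == w) = false := beq_eq_false_iff_ne.mpr (Ne.symm h3)
  have g4 : (['f', 'o', 'r'] == w) = false := beq_eq_false_iff_ne.mpr (Ne.symm h4)
  have g5 : (['w', 'h', 'i', 'l', 'e'] == w) = false := beq_eq_false_iff_ne.mpr (Ne.symm h5)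
  have g6 : (['i', 'm', 'p', 'o', 'r', 't'] == w) = false := beq_eq_false_iff_ne.mpr (Ne.symm h6)
  have g7 : (['f', 'u', 'n', 'c', 't', 'i', 'o', 'n'] == w) = false := beq_eq_false_iff_ne.mpr (Ne.symm h7)
  have g8 : (['r', 'e', 't', 'u', 'r', 'n'] == w) = false := beq_eq_false_iff_ne.mpr (Ne.symm h8)
  have g9 : (['t', 'r', 'u', 'e'] == w) = false := beq_eq_false_iff_ne.mpr (Ne.symm h9)
  have g10 : (['f', 'a', 'l', 's', 'e'] == w) = false := beq_eq_false_iff_ne.mpr (Ne.symm h10)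
  have g11 : (['i', 'n', 't'] == w) = false := beq_eq_false_iff_ne.mpr (Ne.symm h11)
  have g12 : (['s', 't', 'r', 'i', 'n', 'g'] == w) = false := beq_eq_false_iff_ne.mpr (Ne.symm h12)
  have g13 : (['d', 'e', 'c', 'i', 'm', 'a', 'l'] == w) = false := beq_eq_false_iff_ne.mpr (Ne.symm h13)
  have hC : pvClassB = PySem.Dict.mk [("int".toList, "type".toList), ("string".toList, "type".toList), ("decimal".toList, "type".toList), ("true".toList, "boolean".toList), ("false".toList, "boolean".toList), ("if".toList, "keyword".toList), ("else".toList, "keyword".toList), ("elif".toList, "keyword".toList), ("for".toList, "keyword".toList), ("while".toList, "keyword".toList), ("import".toList, "keyword".toList), ("function".toList, "keyword".toList), ("return".toList, "keyword".toList)] := by rfl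
  rw [hC]
  simp [PySem.Dict.getD, PySem.Dict.get?, PySem.Dict.get?_mk_cons, g1, g2, g3, g4, g5, g6, g7, g8, g9, g10, g11, g12, g13]

theorem pvLoopB_acc' (c? : Option Char) (it : List Char) (parts : List (List Char)) :
    pvLoopB c? it parts = parts ++ pvLoopB c? it [] :=
  pvLoopB_acc (it.length + 1) c? it parts (by cases c? <;> simp)

theorem pvSliceSkip (p : Char → Bool) (cs : List Char) (i : Nat) :
    PySem.List.slice cs (some (i : Int)) (some ((pvSkip p cs i : Nat) : Int)) = (cs.drop i).takeWhile p := by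
  rw [PySem.List.slice_natCast, pvSkip_eq]
  have h : i + ((cs.drop i).takeWhile p).length - i = ((cs.drop i).takeWhile p).length := by omega
  rw [h]
  exact (List.prefix_iff_eq_take.mp (List.takeWhile_prefix p)).symm

theorem pvDropSkip (p : Char → Bool) (cs : List Char) (i : Nat) :
    cs.drop (pvSkip p cs i) = (cs.drop i).dropWhile p := by
  rw [pvSkip_eq, ← List.drop_drop]
  conv_lhs => rw [← List.takeWhile_append_dropWhile (p := p) (l := cs.drop i)]
  rw [List.drop_append]
  simp

theorem pvDropSuccTakeWhile (p : Char → Bool) (l : List Char) :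
    l.drop ((l.takeWhile p).length + 1) = (l.dropWhile p).tail := by
  induction l with
  | nil => simp
  | cons a l ihl =>
    by_cases hp : p a = true
    · simp [List.takeWhile_cons_of_pos hp, List.dropWhile_cons_of_pos hp, ihl]
    · simp [List.takeWhile_cons, List.dropWhile_cons, hp]

theorem pvTakeSuccTakeWhile (p : Char → Bool) (l : List Char) :
    l.take ((l.takeWhile p).length + 1) = l.takeWhile p ++ (l.dropWhile p).take 1 := by
  induction l with
  | nil => simp
  | cons a l ihl =>
    by_cases hp : p a = true
    · simp [List.takeWhile_cons_of_pos hp, List.dropWhile_cons_of_pos hp, ihl]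
    · simp [List.takeWhile_cons, List.dropWhile_cons, hp]

theorem pvLoop_eq : ∀ (n : Nat) (cs : List Char) (i : Nat) (result : List Char),
    cs.length - i ≤ n →
    pvLoopA cs i result = result ++ (pvLoopB (cs.drop i).head? (cs.drop i).tail []).flatten := by
  intro n
  induction n with
  | zero =>
    intro cs i result h
    rw [pvLoopA, dif_neg (by omega), List.drop_eq_nil_of_le (by omega)]
    simp [pvLoopB]
  | succ n ih =>
    intro cs i result h
    by_cases hlen : i < cs.length
    case neg =>
      rw [pvLoopA, dif_neg hlen, List.drop_eq_nil_of_le (by omega)]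
      simp [pvLoopB]
    case pos =>
    have hd : cs.drop i = cs.getD i ' ' :: cs.drop (i + 1) := by
      rw [List.getD_eq_getElem cs ' ' hlen, List.getElem_cons_drop]
    rw [pvLoopA, dif_pos hlen, hd]
    simp only [List.head?_cons, List.tail_cons, pvLoopB]
    simp only [show pvIsLetterOrDigit = pvWordChar from rfl,
               show pvIsDigit = PySem.Chars.isdigit from rfl,
               show pvIsLetter = fun ch => PySem.Chars.isalpha ch || ch == '_' from rfl,
               show "=!+-*/<>".toList = pvOPERATORS from by decide,
               show "()[]{}".toList = pvBRACKETS from by decide]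
    by_cases h1 : PySem.Chars.isspace (cs.getD i ' ') = true
    · simp only [h1, dite_true, dite_false, ite_true, ite_false, eq_self_iff_true, Bool.false_eq_true]
      rw [ih cs (i + 1) _ (by omega)]
      conv_rhs => rw [pvLoopB_acc']
      simp
    simp only [h1, dite_true, dite_false, ite_true, ite_false, eq_self_iff_true, Bool.false_eq_true]
    by_cases h2 : PySem.Chars.isdigit (cs.getD i ' ') = true
    · simp only [h2, dite_true, dite_false, ite_true, ite_false, eq_self_iff_true, Bool.false_eq_true]
      have hlt2 := pvSkip_lt PySem.Chars.isdigit cs i hlen h2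
      rw [ih cs (pvSkip PySem.Chars.isdigit cs i) _ (by omega)]
      conv_rhs => rw [pvLoopB_acc']
      rw [pvSliceSkip PySem.Chars.isdigit cs i, pvDropSkip PySem.Chars.isdigit cs i, hd,
          List.takeWhile_cons_of_pos h2, List.dropWhile_cons_of_pos h2, pvTake_eq]
      simp
    simp only [h2, dite_true, dite_false, ite_true, ite_false, eq_self_iff_true, Bool.false_eq_true]
    by_cases h3 : cs.getD i ' ' = '"'
    · simp only [h3, dite_true, dite_false, ite_true, ite_false, eq_self_iff_true, Bool.false_eq_true]
      have hskl := pvSkip_le (fun ch => ch != '"') cs (i + 1)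
      have hsk := pvSkip_eq (fun ch => ch != '"') cs (i + 1)
      have harith : pvSkip (fun ch => ch != '"') cs (i + 1) + 1 - i
          = ((cs.drop (i + 1)).takeWhile (fun ch => ch != '"')).length + 2 := by omega
      have ha2 : pvSkip (fun ch => ch != '"') cs (i + 1) + 1
          = (i + 1) + (((cs.drop (i + 1)).takeWhile (fun ch => ch != '"')).length + 1) := by omega
      rw [ih cs (pvSkip (fun ch => ch != '"') cs (i + 1) + 1) _ (by omega)]
      conv_rhs => rw [pvLoopB_acc']
      rw [pvTake_eq, PySem.List.slice_natCast, harith, ha2]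
      rw [show cs.drop (i + 1 + (((cs.drop (i + 1)).takeWhile (fun ch => ch != '"')).length + 1))
            = (cs.drop (i + 1)).drop (((cs.drop (i + 1)).takeWhile (fun ch => ch != '"')).length + 1)
          from (List.drop_drop).symm]
      rw [pvDropSuccTakeWhile, hd, h3]
      rw [show ((cs.drop (i + 1)).takeWhile (fun ch => ch != '"')).length + 2
            = (((cs.drop (i + 1)).takeWhile (fun ch => ch != '"')).length + 1) + 1 from by omega]
      rw [List.take_succ_cons, pvTakeSuccTakeWhile]
      rcases hq : ((cs.drop (i + 1)).dropWhile (fun ch => ch != '"')).head? with _ | d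
      · have hnil : (cs.drop (i + 1)).dropWhile (fun ch => ch != '"') = [] :=
          List.head?_eq_none_iff.mp hq
        simp [hq, hnil]
      · obtain ⟨t, ht⟩ := List.head?_eq_some_iff.mp hq
        have hdq : d = '"' := by
          have h9 := List.head_dropWhile_not (fun ch => ch != '"') (l := cs.drop (i + 1)) (by simp [ht])
          simp only [ht, List.head_cons] at h9
          simpa using h9
        simp [hq, ht, hdq]
        conv_rhs => rw [pvLoopB_acc']
        simp
    simp only [h3, dite_true, dite_false, ite_true, ite_false, eq_self_iff_true, Bool.false_eq_true]
    by_cases h4 : (PySem.Chars.isalpha (cs.getD i ' ') || cs.getD i ' ' == '_') = true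
    · simp only [h4, dite_true, dite_false, ite_true, ite_false, eq_self_iff_true, Bool.false_eq_true]
      have hwc : pvWordChar (cs.getD i ' ') = true := by
        simp only [pvWordChar, h4, Bool.true_or]
      have hlt4 := pvSkip_lt pvWordChar cs i hlen hwc
      have hb4 : cs.length - pvSkip pvWordChar cs i ≤ n := by omega
      have eI := fun r => ih cs (pvSkip pvWordChar cs i) r hb4
      simp only [eI]
      rw [pvSliceSkip pvWordChar cs i, pvDropSkip pvWordChar cs i, hd,
          List.takeWhile_cons_of_pos hwc, List.dropWhile_cons_of_pos hwc, pvTake_eq, pvClassify]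
      by_cases m1 : (cs.getD i ' ' :: (cs.drop (i + 1)).takeWhile pvWordChar) ∈ pvKEYWORDS
      · simp only [m1, dite_true, dite_false, ite_true, ite_false, eq_self_iff_true, Bool.false_eq_true]
        conv_rhs => rw [pvLoopB_acc']
        simp
      simp only [m1, dite_true, dite_false, ite_true, ite_false, eq_self_iff_true, Bool.false_eq_true]
      by_cases m2 : (cs.getD i ' ' :: (cs.drop (i + 1)).takeWhile pvWordChar) ∈ pvBOOLEANS
      · simp only [m2, dite_true, dite_false, ite_true, ite_false, eq_self_iff_true, Bool.false_eq_true]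
        conv_rhs => rw [pvLoopB_acc']
        simp
      simp only [m2, dite_true, dite_false, ite_true, ite_false, eq_self_iff_true, Bool.false_eq_true]
      by_cases m3 : (cs.getD i ' ' :: (cs.drop (i + 1)).takeWhile pvWordChar) ∈ pvTYPES
      · simp only [m3, dite_true, dite_false, ite_true, ite_false, eq_self_iff_true, Bool.false_eq_true]
        conv_rhs => rw [pvLoopB_acc']
        simp
      · simp only [m3, dite_true, dite_false, ite_true, ite_false, eq_self_iff_true, Bool.false_eq_true]
        conv_rhs => rw [pvLoopB_acc']
        simp
    simp only [h4, dite_true, dite_false, ite_true, ite_false, eq_self_iff_true, Bool.false_eq_true]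
    by_cases h5 : cs.getD i ' ' ∈ pvOPERATORS
    · simp only [h5, dite_true, dite_false, ite_true, ite_false, eq_self_iff_true, Bool.false_eq_true]
      rw [ih cs (i + 1) _ (by omega)]
      conv_rhs => rw [pvLoopB_acc']
      simp
    simp only [h5, dite_true, dite_false, ite_true, ite_false, eq_self_iff_true, Bool.false_eq_true]
    by_cases h6 : cs.getD i ' ' ∈ pvBRACKETS
    · simp only [h6, dite_true, dite_false, ite_true, ite_false, eq_self_iff_true, Bool.false_eq_true]
      rw [ih cs (i + 1) _ (by omega)]
      conv_rhs => rw [pvLoopB_acc']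
      simp
    simp only [h6, dite_true, dite_false, ite_true, ite_false, eq_self_iff_true, Bool.false_eq_true]
    by_cases h7 : cs.getD i ' ' = '#'
    · simp only [h7, dite_true, dite_false, ite_true, ite_false, eq_self_iff_true, Bool.false_eq_true]
      rw [PySem.List.slice_from_natCast, hd, h7]
      simp [pvLoopB]
    simp only [h7, dite_true, dite_false, ite_true, ite_false, eq_self_iff_true, Bool.false_eq_true]
    have h8 : ¬(cs.getD i ' ' = '[') := by
      intro he
      rw [he] at h6
      exact h6 (by decide)
    simp only [h8, dite_true, dite_false, ite_true, ite_false, eq_self_iff_true, Bool.false_eq_true]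
    have h9 : ¬(cs.getD i ' ' = '=' ∧ 0 < i ∧ cs.getD (i - 1) ' ' = ']') := by
      rintro ⟨he, -⟩
      rw [he] at h5
      exact h5 (by decide)
    simp only [h9, dite_true, dite_false, ite_true, ite_false, eq_self_iff_true, Bool.false_eq_true]
    rw [ih cs (i + 1) _ (by omega)]
    conv_rhs => rw [pvLoopB_acc']
    simp

-- ===== VERDICT (by name: the statement is the Claim_ definition above) =====
theorem color_lines_spec : Claim_equal_color_lines := by
  intro line _
  unfold Spec_color_lines color_lines color_lines_alt
  rw [pvLoop_eq line.toList.length line.toList 0 [] (by omega)]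
  simp
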